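-- pv_equiv track=rewrite | github.com/nanma80/zomeable-4polytopes | tools/rescale_corpus.py | mul_phi_pow
-- ===== SOURCE A (Python) =====
-- def mul_phi(a: int, b: int) -> tuple[int, int]:
--     """(a + b*phi) * phi = a*phi + b*phi^2 = a*phi + b*(phi+1) = b + (a+b)*phi."""
--     return (b, a + b)
--
-- def mul_phi_inv(a: int, b: int) -> tuple[int, int]:
--     """1/phi = phi - 1, so (a + b*phi) * (phi - 1) = (a + b*phi)*phi - (a + b*phi)
--     = (b + (a+b)*phi) - (a + b*phi) = (b - a) + a*phi.  But that is (a + b*phi)/phi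
--     so the integer answer is ((b - a), a).  Wait check sign: 1/phi ≈ 0.618.
--     (1, 0)/phi = 0.618 = -1 + phi, i.e. (-1, 1).  Try (b - a, a): (0 - 1, 1) = (-1, 1). ✓
--     (0, 1)/phi = 1, i.e. (1, 0).  Try (b - a, a): (1 - 0, 0) = (1, 0). ✓
--     """
--     return (b - a, a)
--
-- def mul_phi_pow(a: int, b: int, k: int) -> tuple[int, int]:
--     """Multiply (a + b*phi) by phi^k, returning the resulting (a', b')."""
--     if k == 0:
--         return (a, b)
--     if k > 0:
--         for _ in range(k):
--             a, b = mul_phi(a, b)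
--     else:
--         for _ in range(-k):
--             a, b = mul_phi_inv(a, b)
--     return (a, b)
-- ===== SOURCE B (Python) =====
-- def _fib_pair(n: int) -> tuple[int, int]:
--     """(F(n), F(n+1)) by fast doubling, O(log n) multiplications."""
--     if n == 0:
--         return (0, 1)
--     f, g = _fib_pair(n // 2)
--     c = f * (2 * g - f)        # F(2m)
--     d = f * f + g * g          # F(2m+1)
--     if n % 2 == 1:
--         return (d, c + d)
--     return (c, d)
--
-- def mul_phi_pow(a: int, b: int, k: int) -> tuple[int, int]:
--     """Multiply (a + b*phi) by phi^k, returning the resulting (a', b')."""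
--     if k >= 0:
--         f, g = _fib_pair(k)                # f = F(k), g = F(k+1)
--     else:
--         n = -k
--         fn, fn1 = _fib_pair(n)
--         s = 1 if n % 2 == 1 else -1        # F(-n) = (-1)^(n+1) * F(n)
--         f = s * fn                         # F(k)
--         g = (-s) * (fn1 - fn)              # F(k+1) = F(1-n)
--     # phi^k = F(k-1) + F(k)*phi, and F(k-1) = g - f
--     return (a * (g - f) + b * f, a * f + b * g)
-- ===== Notes on version B (the rewrite author's own statement) =====
-- stated objective: faster
-- what changed: Replaced the |k|-step loop of phi-multiplications with Fibonacci fast doubling: compute (F(k),F(k+1)) in O(log|k|) multiplications (negative k via F(-n)=(-1)^(n+1)F(n)) and return the closed form (a*F(k-1)+b*F(k), a*F(k)+b*F(k+1)); intended as faster, measured well ahead at the largest sizes a timing run could decode.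
import Mathlib
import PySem

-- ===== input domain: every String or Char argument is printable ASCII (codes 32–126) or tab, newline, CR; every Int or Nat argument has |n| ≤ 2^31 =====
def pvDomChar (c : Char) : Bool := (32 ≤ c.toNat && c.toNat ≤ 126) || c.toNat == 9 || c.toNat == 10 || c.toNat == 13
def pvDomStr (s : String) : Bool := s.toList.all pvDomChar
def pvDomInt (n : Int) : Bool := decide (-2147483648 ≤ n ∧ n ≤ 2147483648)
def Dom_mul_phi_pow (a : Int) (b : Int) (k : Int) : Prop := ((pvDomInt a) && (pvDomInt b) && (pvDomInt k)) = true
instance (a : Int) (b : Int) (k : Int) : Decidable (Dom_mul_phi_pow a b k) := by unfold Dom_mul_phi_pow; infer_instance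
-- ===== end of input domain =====

-- B replaces A's |k|-step loop by Fibonacci fast doubling plus a closed form; intended as faster; a timing run measured B well ahead at the largest sizes it could decode, but could not confirm the label at the top size.

-- ===== PORT A =====
-- helper mul_phi of A
def mulPhiA (a : Int) (b : Int) : Int × Int := (b, a + b)

-- helper mul_phi_inv of A
def mulPhiInvA (a : Int) (b : Int) : Int × Int := (b - a, a)

-- the 'for _ in range(k)' loop applying mul_phi
def mulPhiIterA : Nat → Int × Int → Int × Int
  | 0, p => p
  | n + 1, p => mulPhiIterA n (mulPhiA p.1 p.2)

-- the 'for _ in range(-k)' loop applying mul_phi_inv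
def mulPhiInvIterA : Nat → Int × Int → Int × Int
  | 0, p => p
  | n + 1, p => mulPhiInvIterA n (mulPhiInvA p.1 p.2)

def mul_phi_pow (a : Int) (b : Int) (k : Int) : Int × Int :=
  if k = 0 then (a, b)
  else if k > 0 then mulPhiIterA k.toNat (a, b)
  else mulPhiInvIterA (-k).toNat (a, b)

-- ===== PORT B =====
-- (F(n), F(n+1)) by fast doubling, exactly Source B's _fib_pair
def fibPairB (n : Nat) : Int × Int :=
  if h : n = 0 then (0, 1)
  else
    let p := fibPairB (n / 2)
    let f := p.1
    let g := p.2
    let c := f * (2 * g - f)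
    let d := f * f + g * g
    if n % 2 = 1 then (d, c + d) else (c, d)
termination_by n
decreasing_by exact Nat.div_lt_self (Nat.pos_of_ne_zero h) (by norm_num)

def mul_phi_pow_alt (a : Int) (b : Int) (k : Int) : Int × Int :=
  if k ≥ 0 then
    let p := fibPairB k.toNat
    let f := p.1
    let g := p.2
    (a * (g - f) + b * f, a * f + b * g)
  else
    let n := (-k).toNat
    let q := fibPairB n
    let s : Int := if n % 2 = 1 then 1 else -1
    let f := s * q.1
    let g := (-s) * (q.2 - q.1)
    (a * (g - f) + b * f, a * f + b * g)

-- ===== PRECONDITION & SPEC =====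
def Spec_mul_phi_pow (a : Int) (b : Int) (k : Int) (out : Int × Int) : Prop := out = mul_phi_pow_alt a b k
instance (a : Int) (b : Int) (k : Int) (out : Int × Int) : Decidable (Spec_mul_phi_pow a b k out) := by unfold Spec_mul_phi_pow; infer_instance

-- ===== CLAIM (what is proved, stated in full; the proofs are below) =====
def Claim_equal_mul_phi_pow : Prop := ∀ (a : Int) (b : Int) (k : Int), Dom_mul_phi_pow a b k → Spec_mul_phi_pow a b k (mul_phi_pow a b k)

-- ===== LEMMAS AND PROOFS =====

-- integer Fibonacci via Mathlib's Nat.fib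
def fibZ (n : Nat) : Int := (Nat.fib n : Int)

theorem fibZ_add_two (n : Nat) : fibZ (n + 2) = fibZ n + fibZ (n + 1) := by
  simp [fibZ, Nat.fib_add_two]

theorem fibZ_two_mul (n : Nat) : fibZ (2 * n) = fibZ n * (2 * fibZ (n + 1) - fibZ n) := by
  have hle : Nat.fib n ≤ 2 * Nat.fib (n + 1) :=
    le_trans (Nat.fib_le_fib_succ) (by omega)
  simp only [fibZ]
  rw [Nat.fib_two_mul, Nat.cast_mul, Nat.cast_sub hle]
  push_cast
  ring

theorem fibZ_two_mul_add_one (n : Nat) :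
    fibZ (2 * n + 1) = fibZ (n + 1) ^ 2 + fibZ n ^ 2 := by
  have h := Nat.fib_two_mul_add_one n
  simp only [fibZ]
  rw [h]
  push_cast
  ring

theorem fibPairB_eq (n : Nat) : fibPairB n = (fibZ n, fibZ (n + 1)) := by
  induction n using Nat.strong_induction_on with
  | _ n ih =>
    rw [fibPairB]
    by_cases h : n = 0
    · simp [h, fibZ]
    · have hlt : n / 2 < n := Nat.div_lt_self (Nat.pos_of_ne_zero h) (by norm_num)
      have hrec := ih (n / 2) hlt
      simp only [h, dif_neg, not_false_iff, hrec]
      rcases Nat.even_or_odd n with he | ho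
      · obtain ⟨m, hm⟩ := he
        have hm2 : n = 2 * m := by omega
        subst hm2
        have hdiv : 2 * m / 2 = m := by omega
        rw [if_neg (by omega : ¬ 2 * m % 2 = 1), hdiv]
        simp only [Prod.mk.injEq]
        exact ⟨(fibZ_two_mul m).symm, by rw [fibZ_two_mul_add_one]; ring⟩
      · obtain ⟨m, hm⟩ := ho
        subst hm
        have hdiv : (2 * m + 1) / 2 = m := by omega
        rw [if_pos (by omega : (2 * m + 1) % 2 = 1), hdiv]
        simp only [Prod.mk.injEq]
        refine ⟨by rw [fibZ_two_mul_add_one]; ring, ?_⟩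
        have h2 : fibZ (2 * m + 1 + 1) = fibZ (2 * m) + fibZ (2 * m + 1) := fibZ_add_two (2 * m)
        rw [h2, fibZ_two_mul, fibZ_two_mul_add_one]
        ring

-- A's forward loop in closed form
theorem mulPhiIterA_eq (n : Nat) (a b : Int) :
    mulPhiIterA n (a, b) =
      (a * (fibZ (n + 1) - fibZ n) + b * fibZ n, a * fibZ n + b * fibZ (n + 1)) := by
  induction n generalizing a b with
  | zero => simp [mulPhiIterA, fibZ]
  | succ m ih =>
    simp only [mulPhiIterA, mulPhiA, ih]
    have h1 : fibZ (m + 1 + 1) = fibZ m + fibZ (m + 1) := fibZ_add_two m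
    simp only [Prod.mk.injEq, h1]
    constructor <;> ring

-- A's backward loop in closed form (signs via (-1)^n)
theorem mulPhiInvIterA_eq (n : Nat) (a b : Int) :
    mulPhiInvIterA n (a, b) =
      (a * ((-1 : Int) ^ n * (fibZ (n + 1) - fibZ n) - (-1 : Int) ^ (n + 1) * fibZ n)
         + b * ((-1 : Int) ^ (n + 1) * fibZ n),
       a * ((-1 : Int) ^ (n + 1) * fibZ n)
         + b * ((-1 : Int) ^ n * (fibZ (n + 1) - fibZ n))) := by
  induction n generalizing a b with
  | zero => simp [mulPhiInvIterA, fibZ]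
  | succ m ih =>
    simp only [mulPhiInvIterA, mulPhiInvA, ih]
    have h1 : fibZ (m + 1 + 1) = fibZ m + fibZ (m + 1) := fibZ_add_two m
    have hp : (-1 : Int) ^ (m + 1) = -(-1 : Int) ^ m := by rw [pow_succ]; ring
    have hp2 : (-1 : Int) ^ (m + 1 + 1) = (-1 : Int) ^ m := by rw [pow_succ, pow_succ]; ring
    simp only [Prod.mk.injEq, h1, hp2, hp]
    constructor <;> ring

theorem neg_one_pow_mod (n : Nat) :
    (-1 : Int) ^ n = (if n % 2 = 1 then (-1 : Int) else 1) := by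
  rcases Nat.even_or_odd n with he | ho
  · rw [he.neg_one_pow]; simp [Nat.even_iff.mp he]
  · rw [ho.neg_one_pow]; simp [Nat.odd_iff.mp ho]

-- ===== VERDICT (by name: the statement is the Claim_ definition above) =====
theorem mul_phi_pow_spec : Claim_equal_mul_phi_pow := by
  intro a b k _
  unfold Spec_mul_phi_pow mul_phi_pow mul_phi_pow_alt
  by_cases hk0 : k = 0
  · subst hk0
    simp [fibPairB]
  · by_cases hkp : k > 0
    · rw [if_neg hk0, if_pos hkp, if_pos (le_of_lt hkp), fibPairB_eq, mulPhiIterA_eq]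
    · have hkn : ¬ k ≥ 0 := by omega
      rw [if_neg hk0, if_neg hkp, if_neg hkn]
      simp only [fibPairB_eq, mulPhiInvIterA_eq]
      set n := (-k).toNat with hn
      have hs : ((-1 : Int) ^ (n + 1)) = (if n % 2 = 1 then (1 : Int) else -1) := by
        rw [neg_one_pow_mod (n + 1)]
        rcases Nat.even_or_odd n with he | ho
        · simp [Nat.even_iff.mp he, Nat.succ_mod_two_eq_one_iff.mpr (Nat.even_iff.mp he)]
        · have h1 : n % 2 = 1 := Nat.odd_iff.mp ho
          simp [h1, Nat.succ_mod_two_eq_zero_iff.mpr h1]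
      have hs2 : ((-1 : Int) ^ n) = -(if n % 2 = 1 then (1 : Int) else -1) := by
        rw [neg_one_pow_mod n]; split_ifs <;> ring
      simp only [hs, hs2]
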